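-- pv_equiv track=rewrite | github.com/ntrancha/Spider-crawler-parser | string_nk.py | decoupe
-- ===== SOURCE A (Python) =====
-- def decoupe(string, start, size):
-- 	index = 0
-- 	ret = ""
-- 	for lettre in string:
-- 		if index >= start and size > 0:
-- 			ret += lettre
-- 			size-=1
-- 		if size < 1:
-- 			return ret
-- 		index+=1
-- 	return ret
-- ===== SOURCE B (Python) =====
-- def decoupe(string, start, size):
--     if size < 1:
--         return ""
--     s = max(start, 0)
--     return string[s:s + size]
-- ===== Notes on version B (the rewrite author's own statement) =====
-- stated objective: simpler
-- what changed: Replaces the character-by-character accumulation loop with early return by a size<1 guard plus one direct slice string[max(start,0):max(start,0)+size].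
import Mathlib
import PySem

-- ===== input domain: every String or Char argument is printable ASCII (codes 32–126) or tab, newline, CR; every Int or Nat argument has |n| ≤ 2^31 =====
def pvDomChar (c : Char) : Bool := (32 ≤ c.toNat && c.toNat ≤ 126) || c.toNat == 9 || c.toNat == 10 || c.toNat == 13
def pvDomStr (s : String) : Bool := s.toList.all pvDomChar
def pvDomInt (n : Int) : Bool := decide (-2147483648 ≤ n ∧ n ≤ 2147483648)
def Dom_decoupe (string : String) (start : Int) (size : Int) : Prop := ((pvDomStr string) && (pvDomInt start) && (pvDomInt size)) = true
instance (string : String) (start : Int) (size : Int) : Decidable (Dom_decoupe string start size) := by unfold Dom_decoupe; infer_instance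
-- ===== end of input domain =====

-- B replaces A's per-character accumulation loop with a size<1 guard plus one direct slice; same return value everywhere.

-- ===== PORT A =====
-- the 'for lettre in string' loop with mutable index/ret/size and the two early returns
def decoupeLoop : List Char → Int → List Char → Int → Int → List Char
  | [], _, ret, _, _ => ret
  | c :: rest, index, ret, start, size =>
    let ret' := if index ≥ start ∧ size > 0 then ret ++ [c] else ret
    let size' := if index ≥ start ∧ size > 0 then size - 1 else size
    if size' < 1 then ret'
    else decoupeLoop rest (index + 1) ret' start size'

def decoupe (string : String) (start : Int) (size : Int) : String :=
  String.ofList (decoupeLoop string.toList 0 [] start size)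

-- ===== PORT B =====
def decoupe_alt (string : String) (start : Int) (size : Int) : String :=
  if size < 1 then ""
  else
    let s := max start 0
    PySem.Str.slice string (some s) (some (s + size))

-- ===== PRECONDITION & SPEC =====
def Spec_decoupe (string : String) (start : Int) (size : Int) (out : String) : Prop := out = decoupe_alt string start size
instance (string : String) (start : Int) (size : Int) (out : String) : Decidable (Spec_decoupe string start size out) := by unfold Spec_decoupe; infer_instance

-- ===== CLAIM (what is proved, stated in full; the proofs are below) =====
def Claim_equal_decoupe : Prop := ∀ (string : String) (start : Int) (size : Int), Dom_decoupe string start size → Spec_decoupe string start size (decoupe string start size)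

-- ===== LEMMAS AND PROOFS =====

-- when size < 1 the loop returns the accumulator unchanged (first 'if size < 1' fires, or the list is empty)
theorem decoupeLoop_small (cs : List Char) (index : Int) (ret : List Char) (start size : Int)
    (h : size < 1) : decoupeLoop cs index ret start size = ret := by
  cases cs with
  | nil => rfl
  | cons c rest =>
    simp only [decoupeLoop]
    have : ¬ (index ≥ start ∧ size > 0) := by omega
    simp [this, h]

-- invariant of A's loop for size ≥ 1: it appends drop-then-take of the remaining characters
theorem decoupeLoop_eq (cs : List Char) : ∀ (index start size : Int) (ret : List Char),
    1 ≤ size →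
    decoupeLoop cs index ret start size = ret ++ (cs.drop (start - index).toNat).take size.toNat := by
  induction cs with
  | nil => intro index start size ret h; simp [decoupeLoop]
  | cons c rest ih =>
    intro index start size ret h
    simp only [decoupeLoop]
    by_cases hc : index ≥ start
    · have hcond : index ≥ start ∧ size > 0 := ⟨hc, by omega⟩
      have hdrop : (start - index).toNat = 0 := by omega
      simp only [hcond, if_pos, and_self, hdrop, List.drop_zero]
      have htake : (c :: rest).take size.toNat = c :: rest.take (size.toNat - 1) := by
        obtain ⟨m, hm⟩ : ∃ m, size.toNat = m + 1 := ⟨size.toNat - 1, by omega⟩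
        simp [hm]
      by_cases hend : size - 1 < 1
      · have hsz1 : size = 1 := by omega
        simp [hsz1, (by omega : (1:Int).toNat = 1)]
      · rw [if_neg hend, ih (index + 1) start (size - 1) (ret ++ [c]) (by omega)]
        have hdrop' : (start - (index + 1)).toNat = 0 := by omega
        have hnat : (size - 1).toNat = size.toNat - 1 := by omega
        simp [hdrop', hnat, htake]
    · have hcond : ¬ (index ≥ start ∧ size > 0) := by omega
      have hnotend : ¬ (size < 1) := by omega
      rw [if_neg hcond, if_neg hcond, if_neg hnotend,
        ih (index + 1) start size ret h]
      have hpos : 1 ≤ start - index := by omega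
      have : (start - index).toNat = (start - (index + 1)).toNat + 1 := by omega
      rw [this, List.drop_succ_cons]

-- ===== VERDICT (by name: the statement is the Claim_ definition above) =====
theorem decoupe_spec : Claim_equal_decoupe := by
  intro string start size _
  unfold Spec_decoupe decoupe decoupe_alt
  by_cases h : size < 1
  · rw [decoupeLoop_small _ _ _ _ _ h, if_pos h]
  · rw [if_neg h, decoupeLoop_eq string.toList 0 start size [] (by omega)]
    have hs : 0 ≤ max start 0 := le_max_right _ _
    have hb : 0 ≤ max start 0 + size := by omega
    apply String.toList_injective
    simp only [PySem.Str.slice, PySem.Chars.slice]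
    rw [PySem.List.slice_toNat string.toList hs hb]
    have h2 : (max start 0 + size).toNat - (max start 0).toNat = size.toNat := by omega
    have h1 : (start - 0).toNat = (max start 0).toNat := by omega
    simp only [List.nil_append, h2]
    rw [h1]
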